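-- pv_equiv track=rewrite | github.com/Bad3r/nixos | scripts/update-logseq-sources.py | replace_git_map
-- ===== SOURCE A (Python) =====
-- def find_map_bounds(content: str, needle_index: int) -> tuple[int, int] | None:
--     depth = 0
--     start = None
--     for i in range(needle_index, -1, -1):
--         ch = content[i]
--         if ch == '}':
--             depth += 1
--         elif ch == '{':
--             if depth == 0:
--                 start = i
--                 break
--             depth -= 1
--     if start is None:
--         return None
--     depth = 0
--     for j in range(start, len(content)):
--         ch = content[j]
--         if ch == '{':
--             depth += 1
--         elif ch == '}':
--             depth -= 1
--             if depth == 0: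
--                 return start, j
--     return None
--
-- def replace_git_map(content: str, rev_strings: list[str], placeholder: str) -> tuple[str, bool]:
--     for rev in rev_strings:
--         search_from = 0
--         while True:
--             idx = content.find(rev, search_from)
--             if idx == -1:
--                 break
--             bounds = find_map_bounds(content, idx)
--             if bounds is None:
--                 search_from = idx + len(rev)
--                 continue
--             start, end = bounds
--             block = content[start : end + 1]
--             if placeholder in block:
--                 return content, True
--             content = content[:start] + f'{{:local/root "{placeholder}"}}' + content[end + 1 :]
--             return content, True
--     return content, False
-- ===== SOURCE B (Python) =====
-- def replace_git_map(content: str, rev_strings: list[str], placeholder: str) -> tuple[str, bool]: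
--     # One forward pass pairs every '{' with its matching '}' (stack discipline);
--     # per occurrence we then just look up the innermost still-open brace.
--     match = {}
--     opens = []
--     stack = []
--     for i, ch in enumerate(content):
--         if ch == '{':
--             stack.append(i)
--             opens.append(i)
--         elif ch == '}':
--             if stack:
--                 match[stack.pop()] = i
--
--     def bounds_at(idx):
--         # innermost '{' at position <= idx still open just after idx
--         for s in reversed(opens):
--             if s <= idx:
--                 e = match.get(s)
--                 if e is None:
--                     return None  # enclosing brace is never closed
--                 if e > idx:
--                     return (s, e)
--         return None
--
--     for rev in rev_strings:
--         search_from = 0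
--         while True:
--             idx = content.find(rev, search_from)
--             if idx == -1:
--                 break
--             bounds = bounds_at(idx)
--             if bounds is None:
--                 search_from = idx + len(rev)
--                 continue
--             start, end = bounds
--             block = content[start : end + 1]
--             if placeholder in block:
--                 return content, True
--             return content[:start] + f'{{:local/root "{placeholder}"}}' + content[end + 1 :], True
--     return content, False
-- ===== Notes on version B (the rewrite author's own statement) =====
-- stated objective: faster
-- what changed: A re-derives the enclosing map block for every occurrence with a backward scan to the opening brace plus a forward scan to its match; B makes one forward pass over content that pairs every '{' with the '}' that pops it (a stack) and then answers each occurrence by looking up the innermost still-open brace in that precomputed pairing.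
-- outside the precondition, e.g. on replace_git_map('{x}', [''], 'p'): A returns ('{:local/root "p"}', True), B returns ('{:local/root "p"}', True)
import Mathlib
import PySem

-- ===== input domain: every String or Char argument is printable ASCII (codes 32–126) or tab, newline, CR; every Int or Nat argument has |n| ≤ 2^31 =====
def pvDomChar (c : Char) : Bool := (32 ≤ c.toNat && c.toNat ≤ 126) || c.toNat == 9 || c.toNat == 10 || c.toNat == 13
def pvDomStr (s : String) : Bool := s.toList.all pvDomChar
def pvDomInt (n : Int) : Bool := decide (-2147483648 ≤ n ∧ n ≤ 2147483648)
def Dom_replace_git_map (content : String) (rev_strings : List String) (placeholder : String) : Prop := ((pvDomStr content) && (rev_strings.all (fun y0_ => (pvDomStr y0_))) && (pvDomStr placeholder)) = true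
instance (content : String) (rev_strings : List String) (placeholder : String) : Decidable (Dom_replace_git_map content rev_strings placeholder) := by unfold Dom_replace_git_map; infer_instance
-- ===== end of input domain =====

-- B replaces A's per-occurrence backward/forward brace scans by ONE forward pass that pairs
-- every '{' with its matching '}', then answers each occurrence by a lookup in that pairing.

-- ===== PORT A =====

-- first loop of find_map_bounds: scan indices needle..0 (k = one past the next index to read;
-- content[i] is always in range at every call site, so the getD default is never read)
def fmbBack (cs : List Char) (k : Nat) (depth : Int) : Option Nat :=
  match k with
  | 0 => none
  | Nat.succ i =>
    if cs.getD i ' ' = '}' then fmbBack cs i (depth + 1)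
    else if cs.getD i ' ' = '{' then
      if depth = 0 then some i else fmbBack cs i (depth - 1)
    else fmbBack cs i depth

-- second loop of find_map_bounds: scan indices start..len-1 ('depth -= 1; if depth == 0' is
-- read as testing depth - 1 before recursing with it)
def fmbFwd (cs : List Char) (j : Nat) (depth : Int) : Option Nat :=
  if h : j < cs.length then
    if cs[j] = '{' then fmbFwd cs (j + 1) (depth + 1)
    else if cs[j] = '}' then
      if depth - 1 = 0 then some j else fmbFwd cs (j + 1) (depth - 1)
    else fmbFwd cs (j + 1) depth
  else none
termination_by cs.length - j

def find_map_bounds (cs : List Char) (needle : Nat) : Option (Nat × Nat) :=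
  match fmbBack cs (needle + 1) 0 with
  | none => none
  | some start =>
    match fmbFwd cs start 0 with
    | none => none
    | some j => some (start, j)

-- the replacement text  {:local/root "<placeholder>"}
def replBlock (ph : List Char) : List Char := "{:local/root \"".toList ++ ph ++ "\"}".toList

-- the 'while True' loop of replace_git_map; none = 'break', some r = 'return r'.
-- fuel only makes the recursion structural: with rev ≠ [] the loop runs ≤ len+1 times
-- (search_from strictly increases and stays ≤ len), so fuel = len+1 is never exhausted.
def loopA (cs ph rev : List Char) (search_from : Nat) : Nat → Option (List Char × Bool)
  | 0 => none
  | Nat.succ fuel =>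
    if PySem.Chars.findFrom cs rev (search_from : Int) none = -1 then none
    else
      match find_map_bounds cs (PySem.Chars.findFrom cs rev (search_from : Int) none).toNat with
      | none => loopA cs ph rev ((PySem.Chars.findFrom cs rev (search_from : Int) none).toNat + rev.length) fuel
      | some (s, e) =>
        -- block = content[start:end+1] (nonneg slice)
        if PySem.Chars.isIn ph ((cs.drop s).take (e + 1 - s)) then some (cs, true)
        else some (cs.take s ++ replBlock ph ++ cs.drop (e + 1), true)

-- the 'for rev in rev_strings' loop
def outerA (cs ph : List Char) : List String → List Char × Bool
  | [] => (cs, false)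
  | rev :: rest =>
    match loopA cs ph rev.toList 0 (cs.length + 1) with
    | some r => r
    | none => outerA cs ph rest

def replace_git_map (content : String) (rev_strings : List String) (placeholder : String) : String × Bool :=
  match outerA content.toList placeholder.toList rev_strings with
  | (r1, r2) => (String.mk r1, r2)

-- ===== PORT B =====

-- one forward pass of Source B: pair each '{' with the '}' that pops it; also collect all '{'
-- positions (opens).  Stack is kept top-at-head (Python appends/pops at the end).
def buildB : List Char → Nat → PySem.Dict Nat Nat → List Nat → List Nat → PySem.Dict Nat Nat × List Nat
  | [], _, m, opens, _ => (m, opens)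
  | c :: rest, i, m, opens, stack =>
    if c = '{' then buildB rest (i + 1) m (opens ++ [i]) (i :: stack)
    else if c = '}' then
      match stack with
      | [] => buildB rest (i + 1) m opens []
      | s :: stack' => buildB rest (i + 1) (m.insert s i) opens stack'
    else buildB rest (i + 1) m opens stack

-- bounds_at's scan over reversed(opens)
def boundsGo (m : PySem.Dict Nat Nat) (idx : Nat) : List Nat → Option (Nat × Nat)
  | [] => none
  | s :: rest =>
    if s ≤ idx then
      match m.get? s with
      | none => none
      | some e => if idx < e then some (s, e) else boundsGo m idx rest
    else boundsGo m idx rest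

def boundsAt (m : PySem.Dict Nat Nat) (opens : List Nat) (idx : Nat) : Option (Nat × Nat) :=
  boundsGo m idx opens.reverse

-- Source B's main loop (same shape as A's, but the bounds come from the precomputed pairing)
def loopB (cs ph rev : List Char) (m : PySem.Dict Nat Nat) (opens : List Nat)
    (search_from : Nat) : Nat → Option (List Char × Bool)
  | 0 => none
  | Nat.succ fuel =>
    if PySem.Chars.findFrom cs rev (search_from : Int) none = -1 then none
    else
      match boundsAt m opens (PySem.Chars.findFrom cs rev (search_from : Int) none).toNat with
      | none => loopB cs ph rev m opens ((PySem.Chars.findFrom cs rev (search_from : Int) none).toNat + rev.length) fuel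
      | some (s, e) =>
        if PySem.Chars.isIn ph ((cs.drop s).take (e + 1 - s)) then some (cs, true)
        else some (cs.take s ++ replBlock ph ++ cs.drop (e + 1), true)

def outerB (cs ph : List Char) (m : PySem.Dict Nat Nat) (opens : List Nat) : List String → List Char × Bool
  | [] => (cs, false)
  | rev :: rest =>
    match loopB cs ph rev.toList m opens 0 (cs.length + 1) with
    | some r => r
    | none => outerB cs ph m opens rest

def replace_git_map_alt (content : String) (rev_strings : List String) (placeholder : String) : String × Bool :=
  match outerB content.toList placeholder.toList
      (buildB content.toList 0 PySem.Dict.empty [] []).1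
      (buildB content.toList 0 PySem.Dict.empty [] []).2 rev_strings with
  | (r1, r2) => (String.mk r1, r2)

-- ===== PRECONDITION & SPEC =====
-- Pre_ excludes rev_strings containing the empty string: on those inputs A (and B) either
-- raises IndexError (empty content) or loops forever once an occurrence of "" has no
-- enclosing map, since search_from is not advanced.
def Pre_replace_git_map (content : String) (rev_strings : List String) (placeholder : String) : Prop :=
  ∀ r ∈ rev_strings, r ≠ ""
instance (content : String) (rev_strings : List String) (placeholder : String) : Decidable (Pre_replace_git_map content rev_strings placeholder) := by unfold Pre_replace_git_map; infer_instance

def pvWitness_replace_git_map : String × List String × String := ("pre {:git/url \"u\" :git/rev \"abc\"} post", ["abc"], "../logseq")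

def Spec_replace_git_map (content : String) (rev_strings : List String) (placeholder : String) (out : String × Bool) : Prop := out = replace_git_map_alt content rev_strings placeholder
instance (content : String) (rev_strings : List String) (placeholder : String) (out : String × Bool) : Decidable (Spec_replace_git_map content rev_strings placeholder out) := by unfold Spec_replace_git_map; infer_instance

-- ===== CLAIM (what is proved, stated in full; the proofs are below) =====
def Claim_equal_replace_git_map : Prop := ∀ (content : String) (rev_strings : List String) (placeholder : String), Dom_replace_git_map content rev_strings placeholder → Pre_replace_git_map content rev_strings placeholder → Spec_replace_git_map content rev_strings placeholder (replace_git_map content rev_strings placeholder)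

-- ===== LEMMAS AND PROOFS =====

-- the stack of still-open '{' positions after reading the first k characters (top at head)
def stk (cs : List Char) : Nat → List Nat
  | 0 => []
  | Nat.succ k =>
    if cs.getD k ' ' = '{' then k :: stk cs k
    else if cs.getD k ' ' = '}' then (stk cs k).tail
    else stk cs k

-- all '{' positions among the first k characters, ascending
def opensTo (cs : List Char) : Nat → List Nat
  | 0 => []
  | Nat.succ k => if cs.getD k ' ' = '{' then opensTo cs k ++ [k] else opensTo cs k

-- all '{' positions at index ≥ i, ascending
def opensFrom (cs : List Char) (i : Nat) : List Nat :=
  if h : i < cs.length then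
    (if cs.getD i ' ' = '{' then [i] else []) ++ opensFrom cs (i + 1)
  else []
termination_by cs.length - i

-- 's is still open when reading position k' (none = never closed; e = its closing position)
def condAfter (cs : List Char) (k s : Nat) : Bool :=
  match fmbFwd cs s 0 with
  | none => true
  | some e => decide (k ≤ e)

theorem fmbFwd_le (cs : List Char) : ∀ (n j : Nat) (d : Int) (e : Nat), cs.length - j ≤ n →
    fmbFwd cs j d = some e → j ≤ e := by
  intro n
  induction n with
  | zero =>
    intro j d e hn h
    unfold fmbFwd at h
    rw [dif_neg (by omega)] at h
    exact absurd h (by simp)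
  | succ n ih =>
    intro j d e hn h
    unfold fmbFwd at h
    by_cases hj : j < cs.length
    · rw [dif_pos hj] at h
      by_cases h1 : cs[j] = '{'
      · rw [if_pos h1] at h
        exact Nat.le_of_succ_le (ih (j + 1) _ e (by omega) h)
      · rw [if_neg h1] at h
        by_cases h2 : cs[j] = '}'
        · rw [if_pos h2] at h
          by_cases h3 : d - 1 = 0
          · rw [if_pos h3] at h; cases h; exact le_refl _
          · rw [if_neg h3] at h
            exact Nat.le_of_succ_le (ih (j + 1) _ e (by omega) h)
        · rw [if_neg h2] at h
          exact Nat.le_of_succ_le (ih (j + 1) _ e (by omega) h)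
    · rw [dif_neg hj] at h
      exact absurd h (by simp)

theorem fmbFwd_close (cs : List Char) : ∀ (n j : Nat) (d : Int) (e : Nat), cs.length - j ≤ n →
    fmbFwd cs j d = some e → cs.getD e ' ' = '}' := by
  intro n
  induction n with
  | zero =>
    intro j d e hn h
    unfold fmbFwd at h
    rw [dif_neg (by omega)] at h
    exact absurd h (by simp)
  | succ n ih =>
    intro j d e hn h
    unfold fmbFwd at h
    by_cases hj : j < cs.length
    · rw [dif_pos hj] at h
      by_cases h1 : cs[j] = '{'
      · rw [if_pos h1] at h
        exact ih (j + 1) _ e (by omega) h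
      · rw [if_neg h1] at h
        by_cases h2 : cs[j] = '}'
        · rw [if_pos h2] at h
          by_cases h3 : d - 1 = 0
          · rw [if_pos h3] at h; cases h
            rw [List.getD_eq_getElem _ _ hj]; exact h2
          · rw [if_neg h3] at h
            exact ih (j + 1) _ e (by omega) h
        · rw [if_neg h2] at h
          exact ih (j + 1) _ e (by omega) h
    · rw [dif_neg hj] at h
      exact absurd h (by simp)

theorem fmbBack_eq_stk (cs : List Char) : ∀ (k d : Nat),
    fmbBack cs k (d : Int) = ((stk cs k).drop d).head? := by
  intro k
  induction k with
  | zero => intro d; simp [fmbBack, stk]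
  | succ k ih =>
    intro d
    unfold fmbBack stk
    by_cases h1 : cs.getD k ' ' = '}'
    · rw [if_pos h1, if_neg (by rw [h1]; decide), if_pos h1]
      rw [show ((d : Int) + 1) = ((d + 1 : Nat) : Int) by push_cast; ring, ih (d + 1),
        ← List.drop_one, List.drop_drop, Nat.add_comm]
    · by_cases h2 : cs.getD k ' ' = '{'
      · rw [if_neg h1, if_pos h2, if_pos h2]
        rcases Nat.eq_zero_or_pos d with hd | hd
        · subst hd
          rw [if_pos (by norm_num)]
          simp
        · rw [if_neg (by exact_mod_cast Nat.pos_iff_ne_zero.mp hd)]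
          obtain ⟨d', rfl⟩ := Nat.exists_eq_succ_of_ne_zero (Nat.pos_iff_ne_zero.mp hd)
          rw [show ((d' + 1 : Nat) : Int) - 1 = ((d' : Nat) : Int) by push_cast; ring, ih d']
          simp
      · rw [if_neg h1, if_neg h2, if_neg h2, if_neg h1, ih d]

theorem fmbFwd_stk (cs : List Char) : ∀ (k : Nat), k ≤ cs.length → ∀ (d : Nat) (h : d < (stk cs k).length),
    fmbFwd cs ((stk cs k)[d]) 0 = fmbFwd cs k ((d : Int) + 1) := by
  intro k
  induction k with
  | zero => intro _ d h; simp [stk] at h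
  | succ k ih =>
    intro hk d hd
    have hklen : k < cs.length := hk
    have hget : cs.getD k ' ' = cs[k] := List.getD_eq_getElem _ _ hklen
    by_cases h1 : cs.getD k ' ' = '{'
    · have hs : stk cs (k + 1) = k :: stk cs k := by
        show (if cs.getD k ' ' = '{' then k :: stk cs k else _) = _
        rw [if_pos h1]
      match d with
      | 0 =>
        simp only [hs, List.getElem_cons_zero]
        show fmbFwd cs k 0 = fmbFwd cs (k + 1) ((0 : Nat) + 1 : Int)
        conv_lhs => unfold fmbFwd
        rw [dif_pos hklen, if_pos (by rw [← hget]; exact h1)]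
        norm_num
      | d + 1 =>
        simp only [hs, List.getElem_cons_succ] at hd ⊢
        rw [ih (le_of_lt hklen) d (by simpa using hd)]
        conv_rhs => rw [show (((d + 1 : Nat) : Int) + 1) = (((d : Nat) : Int) + 1) + 1 by push_cast; ring]
        conv_lhs => unfold fmbFwd
        rw [dif_pos hklen, if_pos (by rw [← hget]; exact h1)]
    · by_cases h2 : cs.getD k ' ' = '}'
      · have hs : stk cs (k + 1) = (stk cs k).tail := by
          show (if cs.getD k ' ' = '{' then k :: stk cs k else if cs.getD k ' ' = '}' then (stk cs k).tail else stk cs k) = _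
          rw [if_neg h1, if_pos h2]
        simp only [hs, List.getElem_tail] at hd ⊢
        have hd' : d + 1 < (stk cs k).length := by
          rw [List.length_tail] at hd; omega
        rw [ih (le_of_lt hklen) (d + 1) hd']
        conv_lhs => unfold fmbFwd
        rw [dif_pos hklen, if_neg (by rw [← hget, h2]; decide), if_pos (by rw [← hget]; exact h2),
          if_neg (by push_cast; omega)]
        congr 1
        push_cast; ring
      · have hs : stk cs (k + 1) = stk cs k := by
          show (if cs.getD k ' ' = '{' then k :: stk cs k else if cs.getD k ' ' = '}' then (stk cs k).tail else stk cs k) = _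
          rw [if_neg h1, if_neg h2]
        simp only [hs] at hd ⊢
        rw [ih (le_of_lt hklen) d hd]
        conv_lhs => unfold fmbFwd
        rw [dif_pos hklen, if_neg (by rw [← hget]; exact h1), if_neg (by rw [← hget]; exact h2)]

theorem opensTo_mem (cs : List Char) : ∀ (k s : Nat), s ∈ opensTo cs k → s < k := by
  intro k
  induction k with
  | zero => intro s hs; simp [opensTo] at hs
  | succ k ih =>
    intro s hs
    unfold opensTo at hs
    split_ifs at hs with h
    · rcases List.mem_append.mp hs with h' | h'
      · exact lt_trans (ih s h') (by omega)
      · simp at h'; omega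
    · exact lt_trans (ih s hs) (by omega)

theorem opensTo_pairwise (cs : List Char) : ∀ (k : Nat), (opensTo cs k).Pairwise (· < ·) := by
  intro k
  induction k with
  | zero => simp [opensTo]
  | succ k ih =>
    unfold opensTo
    by_cases h : cs.getD k ' ' = '{'
    · rw [if_pos h]
      refine List.pairwise_append.mpr ⟨ih, by simp, ?_⟩
      intro a ha b hb
      simp only [List.mem_singleton] at hb
      rw [hb]
      exact opensTo_mem cs k a ha
    · rw [if_neg h]
      exact ih

theorem opensFrom_mem (cs : List Char) : ∀ (n i s : Nat), cs.length - i ≤ n → s ∈ opensFrom cs i →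
    i ≤ s ∧ s < cs.length ∧ cs.getD s ' ' = '{' := by
  intro n
  induction n with
  | zero =>
    intro i s hn hs
    unfold opensFrom at hs
    rw [dif_neg (by omega)] at hs
    simp at hs
  | succ n ih =>
    intro i s hn hs
    unfold opensFrom at hs
    by_cases hi : i < cs.length
    · rw [dif_pos hi] at hs
      rcases List.mem_append.mp hs with h' | h'
      · split_ifs at h' with hc
        · simp at h'; subst h'; exact ⟨le_refl _, hi, hc⟩
        · simp at h'
      · have := ih (i + 1) s (by omega) h'
        exact ⟨by omega, this.2⟩
    · rw [dif_neg hi] at hs; simp at hs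

theorem opensTo_append_opensFrom (cs : List Char) : ∀ (n i : Nat), i + n = cs.length →
    opensTo cs i ++ opensFrom cs i = opensTo cs cs.length := by
  intro n
  induction n with
  | zero =>
    intro i hi
    unfold opensFrom
    rw [dif_neg (by omega)]
    simp [show i = cs.length by omega]
  | succ n ih =>
    intro i hi
    conv_lhs => rw [opensFrom]
    rw [dif_pos (by omega)]
    by_cases hc : cs.getD i ' ' = '{'
    · rw [if_pos hc, ← ih (i + 1) (by omega)]
      have h2 : opensTo cs (i + 1) = opensTo cs i ++ [i] := by
        show (if cs.getD i ' ' = '{' then opensTo cs i ++ [i] else opensTo cs i) = _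
        rw [if_pos hc]
      rw [h2]
      simp
    · rw [if_neg hc, ← ih (i + 1) (by omega)]
      have h2 : opensTo cs (i + 1) = opensTo cs i := by
        show (if cs.getD i ' ' = '{' then opensTo cs i ++ [i] else opensTo cs i) = _
        rw [if_neg hc]
      rw [h2]
      simp

theorem stk_eq_filter (cs : List Char) : ∀ (k : Nat), k ≤ cs.length →
    stk cs k = ((opensTo cs k).filter (fun s => condAfter cs k s)).reverse := by
  intro k
  induction k with
  | zero => intro _; simp [stk, opensTo]
  | succ k ih =>
    intro hk
    have hk' : k ≤ cs.length := by omega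
    have hklen : k < cs.length := hk
    have hget : cs.getD k ' ' = cs[k] := List.getD_eq_getElem _ _ hklen
    have IH := ih hk'
    by_cases h1 : cs.getD k ' ' = '{'
    · have hs : stk cs (k + 1) = k :: stk cs k := by
        show (if cs.getD k ' ' = '{' then k :: stk cs k
          else if cs.getD k ' ' = '}' then (stk cs k).tail else stk cs k) = _
        rw [if_pos h1]
      have ho : opensTo cs (k + 1) = opensTo cs k ++ [k] := by
        show (if cs.getD k ' ' = '{' then opensTo cs k ++ [k] else opensTo cs k) = _
        rw [if_pos h1]
      have hcondk : condAfter cs (k + 1) k = true := by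
        unfold condAfter
        cases hv : fmbFwd cs k 0 with
        | none => rfl
        | some e =>
          have hv' : fmbFwd cs (k + 1) (0 + 1) = some e := by
            have h0 := hv
            conv at h0 => lhs; unfold fmbFwd
            rw [dif_pos hklen, if_pos (by rw [← hget]; exact h1)] at h0
            exact h0
          have he : k + 1 ≤ e := fmbFwd_le cs (cs.length - (k + 1)) (k + 1) (0 + 1) e (le_refl _) hv'
          simp only [decide_eq_true_eq]
          omega
      have hcong : (opensTo cs k).filter (fun s => condAfter cs (k + 1) s)
          = (opensTo cs k).filter (fun s => condAfter cs k s) := by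
        apply List.filter_congr
        intro s _
        unfold condAfter
        cases hv : fmbFwd cs s 0 with
        | none => rfl
        | some e =>
          have hcl : cs.getD e ' ' = '}' := fmbFwd_close cs (cs.length - s) s 0 e (le_refl _) hv
          have hne : e ≠ k := by
            intro hek
            rw [hek, h1] at hcl
            exact absurd hcl (by decide)
          simp only [decide_eq_decide]
          omega
      have hfk : List.filter (fun s => condAfter cs (k + 1) s) [k] = [k] := by
        simp [hcondk]
      rw [hs, ho, List.filter_append, hfk, hcong, List.reverse_append, ← IH]
      simp
    · by_cases h2 : cs.getD k ' ' = '}'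
      · have hs : stk cs (k + 1) = (stk cs k).tail := by
          show (if cs.getD k ' ' = '{' then k :: stk cs k
            else if cs.getD k ' ' = '}' then (stk cs k).tail else stk cs k) = _
          rw [if_neg h1, if_pos h2]
        have ho : opensTo cs (k + 1) = opensTo cs k := by
          show (if cs.getD k ' ' = '{' then opensTo cs k ++ [k] else opensTo cs k) = _
          rw [if_neg h1]
        cases hstk : stk cs k with
        | nil =>
          have hfk : (opensTo cs k).filter (fun s => condAfter cs k s) = [] := by
            have h' := IH
            rw [hstk] at h'
            have h'' := congrArg List.reverse h'
            simpa using h''.symm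
          have hf1 : (opensTo cs k).filter (fun s => condAfter cs (k + 1) s) = [] := by
            rw [List.filter_eq_nil_iff]
            intro s hs'
            have h0 : ¬ condAfter cs k s = true := List.filter_eq_nil_iff.mp hfk s hs'
            unfold condAfter at h0 ⊢
            cases hv : fmbFwd cs s 0 with
            | none => rw [hv] at h0; simp at h0
            | some e =>
              rw [hv] at h0
              have hlt : ¬ k ≤ e := by simpa using h0
              change ¬ decide (k + 1 ≤ e) = true
              simp only [decide_eq_true_eq]
              omega
          rw [hs, hstk, ho, hf1]
          rfl
        | cons t tl =>
          have hfk : (opensTo cs k).filter (fun s => condAfter cs k s) = tl.reverse ++ [t] := by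
            have h' := IH
            rw [hstk] at h'
            have h'' := congrArg List.reverse h'
            simpa using h''.symm
          have hnd : ((opensTo cs k).filter (fun s => condAfter cs k s)).Nodup :=
            List.Nodup.filter _ ((opensTo_pairwise cs k).imp (fun h => ne_of_lt h))
          have htnotin : t ∉ tl.reverse := by
            rw [hfk] at hnd
            have heq : (tl.reverse ++ [t]) = (t :: tl).reverse := by simp
            rw [heq] at hnd
            have hnd2 : (t :: tl).Nodup := List.nodup_reverse.mp hnd
            intro hmem
            exact (List.nodup_cons.mp hnd2).1 (List.mem_reverse.mp hmem)
          have htop : fmbFwd cs t 0 = some k := by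
            have h0 := fmbFwd_stk cs k hk' 0 (by rw [hstk]; simp)
            simp only [hstk, List.getElem_cons_zero] at h0
            rw [h0]
            conv_lhs => unfold fmbFwd
            rw [dif_pos hklen, if_neg (by rw [← hget, h2]; decide),
              if_pos (by rw [← hget]; exact h2), if_pos (by norm_num)]
          have hcong : (opensTo cs k).filter (fun s => condAfter cs (k + 1) s)
              = ((opensTo cs k).filter (fun s => condAfter cs k s)).filter (fun s => !(s == t)) := by
            rw [List.filter_filter]
            apply List.filter_congr
            intro s hs'
            by_cases hck : condAfter cs k s = true
            · have hmem : s ∈ stk cs k := by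
                rw [IH, List.mem_reverse, List.mem_filter]
                exact ⟨hs', hck⟩
              rw [hstk] at hmem
              by_cases hst : s = t
              · subst hst
                unfold condAfter
                rw [htop]
                simp
              · have hmem' : s ∈ tl := by
                  cases List.mem_cons.mp hmem with
                  | inl h => exact absurd h hst
                  | inr h => exact h
                obtain ⟨d, hdlt, hdeq⟩ := List.getElem_of_mem hmem'
                have h0 := fmbFwd_stk cs k hk' (d + 1)
                  (by rw [hstk]; simpa using Nat.succ_lt_succ hdlt)
                simp only [hstk, List.getElem_cons_succ] at h0
                rw [hdeq] at h0
                have h0' : fmbFwd cs s 0 = fmbFwd cs (k + 1) ((d : Int) + 1) := by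
                  rw [h0]
                  conv_lhs => unfold fmbFwd
                  rw [dif_pos hklen, if_neg (by rw [← hget, h2]; decide),
                    if_pos (by rw [← hget]; exact h2), if_neg (by push_cast; omega)]
                  congr 1
                  push_cast
                  ring
                unfold condAfter
                rw [h0']
                cases hv : fmbFwd cs (k + 1) ((d : Int) + 1) with
                | none => simp [hst]
                | some e =>
                  have he : k + 1 ≤ e := fmbFwd_le cs (cs.length - (k + 1)) (k + 1) _ e (le_refl _) hv
                  simp [hst, he, Nat.le_of_succ_le he]
            · have hf : condAfter cs k s = false := by
                cases hb : condAfter cs k s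
                · rfl
                · exact absurd hb hck
              unfold condAfter at hf ⊢
              cases hv : fmbFwd cs s 0 with
              | none => rw [hv] at hf; simp at hf
              | some e =>
                rw [hv] at hf
                have hlt : ¬ k ≤ e := by simpa using hf
                change decide (k + 1 ≤ e) = (!(s == t) && decide (k ≤ e))
                have h3 : (decide (k ≤ e)) = false := by simp [hlt]
                rw [h3, Bool.and_false]
                simp only [decide_eq_false_iff_not]
                omega
          rw [hs, hstk, ho, hcong, hfk, List.filter_append]
          have hA : tl.reverse.filter (fun s => !(s == t)) = tl.reverse := by
            apply List.filter_eq_self.mpr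
            intro a ha
            have hat : a ≠ t := fun hat => htnotin (hat ▸ ha)
            simp [hat]
          have hB : ([t] : List Nat).filter (fun s => !(s == t)) = [] := by simp
          rw [hA, hB]
          simp
      · have hs : stk cs (k + 1) = stk cs k := by
          show (if cs.getD k ' ' = '{' then k :: stk cs k
            else if cs.getD k ' ' = '}' then (stk cs k).tail else stk cs k) = _
          rw [if_neg h1, if_neg h2]
        have ho : opensTo cs (k + 1) = opensTo cs k := by
          show (if cs.getD k ' ' = '{' then opensTo cs k ++ [k] else opensTo cs k) = _
          rw [if_neg h1]
        have hcong : (opensTo cs k).filter (fun s => condAfter cs (k + 1) s)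
            = (opensTo cs k).filter (fun s => condAfter cs k s) := by
          apply List.filter_congr
          intro s _
          unfold condAfter
          cases hv : fmbFwd cs s 0 with
          | none => rfl
          | some e =>
            have hcl : cs.getD e ' ' = '}' := fmbFwd_close cs (cs.length - s) s 0 e (le_refl _) hv
            have hne : e ≠ k := by
              intro hek
              rw [hek] at hcl
              exact h2 hcl
            simp only [decide_eq_decide]
            omega
        rw [hs, ho, hcong]
        exact IH

theorem opensFrom_unfold (cs : List Char) (j : Nat) : opensFrom cs j =
    if _h : j < cs.length then (if cs.getD j ' ' = '{' then [j] else []) ++ opensFrom cs (j + 1)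
    else [] := by
  rw [opensFrom]

-- the result of Source B's single pass
theorem buildB_spec (cs : List Char) : ∀ (rest : List Char) (i : Nat) (m : PySem.Dict Nat Nat) (o S : List Nat),
    rest = cs.drop i →
    S.Nodup →
    (∀ k v, m.get? k = some v → k < i) →
    (∀ s ∈ S, s < i ∧ m.get? s = none) →
    (∀ k v, m.get? k = some v → (buildB rest i m o S).1.get? k = some v) ∧
    (∀ (d : Nat) (hd : d < S.length), (buildB rest i m o S).1.get? S[d] = fmbFwd cs i ((d : Int) + 1)) ∧
    (∀ s, i ≤ s → s < cs.length → cs.getD s ' ' = '{' → (buildB rest i m o S).1.get? s = fmbFwd cs s 0) ∧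
    (buildB rest i m o S).2 = o ++ opensFrom cs i := by
  intro rest
  induction rest with
  | nil =>
    intro i m o S hrest hnd hkeys hS
    have hlen : cs.length ≤ i := by
      by_contra hlt
      push_neg at hlt
      have hne : cs.drop i ≠ [] := by
        simp only [ne_eq, List.drop_eq_nil_iff]
        omega
      exact hne hrest.symm
    refine ⟨fun k v h => h, ?_, ?_, ?_⟩
    · intro d hd
      show m.get? S[d] = _
      rw [(hS _ (List.getElem_mem hd)).2]
      unfold fmbFwd
      rw [dif_neg (by omega)]
    · intro s his hslen _
      omega
    · show o = o ++ opensFrom cs i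
      unfold opensFrom
      rw [dif_neg (by omega)]
      simp
  | cons c rest' ih =>
    intro i m o S hrest hnd hkeys hS
    have hi : i < cs.length := by
      by_contra h
      push_neg at h
      rw [List.drop_eq_nil_of_le h] at hrest
      cases hrest
    have hcons : cs.drop i = cs[i] :: cs.drop (i + 1) := List.drop_eq_getElem_cons hi
    have hc : cs[i] = c := by
      rw [hcons] at hrest
      cases hrest
      rfl
    have hrest' : rest' = cs.drop (i + 1) := by
      rw [hcons, hc] at hrest
      cases hrest
      rfl
    have hgd : cs.getD i ' ' = c := by rw [List.getD_eq_getElem _ _ hi, hc]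
    by_cases h1 : c = '{'
    · have hb : buildB (c :: rest') i m o S = buildB rest' (i + 1) m (o ++ [i]) (i :: S) := by
        show (if c = '{' then _ else _) = _
        rw [if_pos h1]
      have hment : m.get? i = none := by
        cases hv : m.get? i with
        | none => rfl
        | some v => exact absurd (hkeys i v hv) (lt_irrefl i)
      obtain ⟨IH1, IH2, IH3, IH4⟩ := ih (i + 1) m (o ++ [i]) (i :: S) hrest'
        (List.nodup_cons.mpr ⟨fun hmem => absurd (hS i hmem).1 (lt_irrefl i), hnd⟩)
        (fun k v hv => by have := hkeys k v hv; omega)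
        (by
          intro s hsmem
          cases List.mem_cons.mp hsmem with
          | inl h => exact ⟨by omega, h ▸ hment⟩
          | inr h => exact ⟨by have := (hS s h).1; omega, (hS s h).2⟩)
      rw [hb]
      refine ⟨IH1, ?_, ?_, ?_⟩
      · intro d hd
        have h2 := IH2 (d + 1) (by simpa using Nat.succ_lt_succ hd)
        simp only [List.getElem_cons_succ] at h2
        rw [h2]
        conv_rhs => unfold fmbFwd
        rw [dif_pos hi, if_pos (by rw [hc]; exact h1)]
        exact congrArg (fmbFwd cs (i + 1)) (by push_cast; ring)
      · intro s his hslen hsopen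
        rcases Nat.eq_or_lt_of_le his with heq | hlt
        · have h2 := IH2 0 (by simp)
          simp only [List.getElem_cons_zero] at h2
          rw [← heq, h2]
          conv_rhs => unfold fmbFwd
          rw [dif_pos hi, if_pos (by rw [hc]; exact h1)]
          norm_num
        · exact IH3 s hlt hslen hsopen
      · rw [IH4]
        have hof : opensFrom cs i = i :: opensFrom cs (i + 1) := by
          have hu := opensFrom_unfold cs i
          rw [dif_pos hi, if_pos (by rw [hgd]; exact h1)] at hu
          simpa using hu
        rw [hof]
        simp
    · by_cases h2 : c = '}'
      · have hof : opensFrom cs i = opensFrom cs (i + 1) := by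
          have hu := opensFrom_unfold cs i
          rw [dif_pos hi, if_neg (by rw [hgd]; exact h1)] at hu
          simpa using hu
        cases S with
        | nil =>
          have hb : buildB (c :: rest') i m o [] = buildB rest' (i + 1) m o [] := by
            show (if c = '{' then _ else if c = '}' then _ else _) = _
            rw [if_neg h1, if_pos h2]
          obtain ⟨IH1, IH2, IH3, IH4⟩ := ih (i + 1) m o [] hrest'
            (by simp)
            (fun k v hv => by have := hkeys k v hv; omega)
            (by simp)
          rw [hb]
          refine ⟨IH1, ?_, ?_, by rw [IH4, hof]⟩
          · intro d hd
            simp at hd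
          · intro s his hslen hsopen
            have hsne : s ≠ i := by
              intro hsi
              rw [hsi, hgd, h2] at hsopen
              exact absurd hsopen (by decide)
            exact IH3 s (by omega) hslen hsopen
        | cons t S' =>
          have hment : m.get? t = none := (hS t (by simp)).2
          have htlt : t < i := (hS t (by simp)).1
          have hb : buildB (c :: rest') i m o (t :: S') = buildB rest' (i + 1) (m.insert t i) o S' := by
            show (if c = '{' then _ else if c = '}' then _ else _) = _
            rw [if_neg h1, if_pos h2]
          obtain ⟨IH1, IH2, IH3, IH4⟩ := ih (i + 1) (m.insert t i) o S' hrest'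
            (List.nodup_cons.mp hnd).2
            (by
              intro k v hv
              rw [PySem.Dict.get?_insert] at hv
              by_cases hkt : k = t
              · omega
              · rw [if_neg hkt] at hv
                have := hkeys k v hv
                omega)
            (by
              intro s hsm
              have hst : s ≠ t := fun h => (List.nodup_cons.mp hnd).1 (h ▸ hsm)
              refine ⟨by have := (hS s (List.mem_cons_of_mem _ hsm)).1; omega, ?_⟩
              rw [PySem.Dict.get?_insert, if_neg hst]
              exact (hS s (List.mem_cons_of_mem _ hsm)).2)
          rw [hb]
          refine ⟨?_, ?_, ?_, by rw [IH4, hof]⟩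
          · intro k v hv
            have hkt : k ≠ t := by
              intro h
              rw [h, hment] at hv
              cases hv
            exact IH1 k v (by rw [PySem.Dict.get?_insert, if_neg hkt]; exact hv)
          · intro d hd
            match d with
            | 0 =>
              simp only [List.getElem_cons_zero]
              have hti := IH1 t i (by rw [PySem.Dict.get?_insert, if_pos rfl])
              rw [hti]
              conv_rhs => unfold fmbFwd
              rw [dif_pos hi, if_neg (by rw [hc, h2]; decide), if_pos (by rw [hc]; exact h2),
                if_pos (by norm_num)]
            | d + 1 =>
              simp only [List.getElem_cons_succ]
              have h3 := IH2 d (by simpa using hd)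
              rw [h3]
              conv_rhs => unfold fmbFwd
              rw [dif_pos hi, if_neg (by rw [hc, h2]; decide), if_pos (by rw [hc]; exact h2),
                if_neg (by push_cast; omega)]
              try (congr 1; push_cast; ring)
          · intro s his hslen hsopen
            have hsne : s ≠ i := by
              intro hsi
              rw [hsi, hgd, h2] at hsopen
              exact absurd hsopen (by decide)
            exact IH3 s (by omega) hslen hsopen
      · have hb : buildB (c :: rest') i m o S = buildB rest' (i + 1) m o S := by
          show (if c = '{' then _ else if c = '}' then _ else _) = _
          rw [if_neg h1, if_neg h2]
        have hof : opensFrom cs i = opensFrom cs (i + 1) := by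
          have hu := opensFrom_unfold cs i
          rw [dif_pos hi, if_neg (by rw [hgd]; exact h1)] at hu
          simpa using hu
        obtain ⟨IH1, IH2, IH3, IH4⟩ := ih (i + 1) m o S hrest'
          hnd
          (fun k v hv => by have := hkeys k v hv; omega)
          (by
            intro s hsm
            exact ⟨by have := (hS s hsm).1; omega, (hS s hsm).2⟩)
        rw [hb]
        refine ⟨IH1, ?_, ?_, by rw [IH4, hof]⟩
        · intro d hd
          rw [IH2 d hd]
          conv_rhs => unfold fmbFwd
          rw [dif_pos hi, if_neg (by rw [hc]; exact h1), if_neg (by rw [hc]; exact h2)]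
        · intro s his hslen hsopen
          have hsne : s ≠ i := by
            intro hsi
            rw [hsi, hgd] at hsopen
            exact h1 hsopen
          exact IH3 s (by omega) hslen hsopen

theorem boundsGo_eq (cs : List Char) (idx : Nat) : ∀ (r : List Nat),
    (∀ s ∈ r, s < cs.length ∧ cs.getD s ' ' = '{') →
    boundsGo (buildB cs 0 PySem.Dict.empty [] []).1 idx r =
      match (r.filter (fun s => decide (s ≤ idx) && condAfter cs (idx + 1) s)).head? with
      | none => none
      | some s =>
        match fmbFwd cs s 0 with
        | none => none
        | some e => some (s, e) := by
  have hspec := buildB_spec cs cs 0 PySem.Dict.empty [] [] (by simp) (by simp)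
    (by intro k v hv; rw [PySem.Dict.get?_empty] at hv; cases hv) (by simp)
  obtain ⟨-, -, hget, -⟩ := hspec
  intro r
  induction r with
  | nil => intro _; rfl
  | cons s r' ihr =>
    intro hmem
    have hs := hmem s (by simp)
    have hg : (buildB cs 0 PySem.Dict.empty [] []).1.get? s = fmbFwd cs s 0 :=
      hget s (Nat.zero_le _) hs.1 hs.2
    show (if s ≤ idx then
        match (buildB cs 0 PySem.Dict.empty [] []).1.get? s with
        | none => none
        | some e => if idx < e then some (s, e) else boundsGo (buildB cs 0 PySem.Dict.empty [] []).1 idx r'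
      else boundsGo (buildB cs 0 PySem.Dict.empty [] []).1 idx r') = _
    by_cases hle : s ≤ idx
    · rw [if_pos hle, hg]
      cases hv : fmbFwd cs s 0 with
      | none =>
        have hcond : (decide (s ≤ idx) && condAfter cs (idx + 1) s) = true := by
          unfold condAfter
          rw [hv]
          simp [hle]
        rw [List.filter_cons_of_pos (p := fun s => decide (s ≤ idx) && condAfter cs (idx + 1) s) hcond]
        simp [hv]
      | some e =>
        by_cases hlt2 : idx < e
        · have hcond : (decide (s ≤ idx) && condAfter cs (idx + 1) s) = true := by
            unfold condAfter
            rw [hv]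
            simp only [Bool.and_eq_true, decide_eq_true_eq]
            omega
          rw [List.filter_cons_of_pos (p := fun s => decide (s ≤ idx) && condAfter cs (idx + 1) s) hcond]
          simp [hv, hlt2]
        · have hcond : ¬ (decide (s ≤ idx) && condAfter cs (idx + 1) s) = true := by
            unfold condAfter
            rw [hv]
            simp only [Bool.and_eq_true, decide_eq_true_eq]
            omega
          rw [List.filter_cons_of_neg (p := fun s => decide (s ≤ idx) && condAfter cs (idx + 1) s) hcond]
          simpa [hlt2] using ihr (fun a ha => hmem a (List.mem_cons_of_mem _ ha))
    · have hcond : ¬ (decide (s ≤ idx) && condAfter cs (idx + 1) s) = true := by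
        simp only [Bool.and_eq_true, decide_eq_true_eq]
        intro h
        exact hle h.1
      rw [if_neg hle, List.filter_cons_of_neg (p := fun s => decide (s ≤ idx) && condAfter cs (idx + 1) s) hcond]
      exact ihr (fun a ha => hmem a (List.mem_cons_of_mem _ ha))

theorem bounds_eq (cs : List Char) (idx : Nat) (hidx : idx < cs.length) :
    boundsAt (buildB cs 0 PySem.Dict.empty [] []).1 (buildB cs 0 PySem.Dict.empty [] []).2 idx =
      find_map_bounds cs idx := by
  have hspec := buildB_spec cs cs 0 PySem.Dict.empty [] [] (by simp) (by simp)
    (by intro k v hv; rw [PySem.Dict.get?_empty] at hv; cases hv) (by simp)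
  obtain ⟨-, -, -, hopens⟩ := hspec
  have hoF : (buildB cs 0 PySem.Dict.empty [] []).2 = opensFrom cs 0 := by simpa using hopens
  unfold boundsAt
  rw [hoF]
  rw [boundsGo_eq cs idx (opensFrom cs 0).reverse (by
    intro s hsm
    have := opensFrom_mem cs cs.length 0 s (by omega) (List.mem_reverse.mp hsm)
    exact ⟨this.2.1, this.2.2⟩)]
  rw [List.filter_reverse]
  have hsplit : opensFrom cs 0 = opensTo cs (idx + 1) ++ opensFrom cs (idx + 1) := by
    have h0 := opensTo_append_opensFrom cs cs.length 0 (by omega)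
    have h1 := opensTo_append_opensFrom cs (cs.length - (idx + 1)) (idx + 1) (by omega)
    rw [show opensTo cs 0 = [] from rfl] at h0
    rw [← h1] at h0
    simpa using h0
  rw [hsplit, List.filter_append]
  have hright : (opensFrom cs (idx + 1)).filter
      (fun s => decide (s ≤ idx) && condAfter cs (idx + 1) s) = [] := by
    rw [List.filter_eq_nil_iff]
    intro s hsm
    have hge := (opensFrom_mem cs (cs.length - (idx + 1)) (idx + 1) s (by omega) hsm).1
    have hns : ¬ s ≤ idx := by omega
    simp [hns]
  have hleft : (opensTo cs (idx + 1)).filter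
      (fun s => decide (s ≤ idx) && condAfter cs (idx + 1) s)
      = (opensTo cs (idx + 1)).filter (fun s => condAfter cs (idx + 1) s) := by
    apply List.filter_congr
    intro s hsm
    have := opensTo_mem cs (idx + 1) s hsm
    have hle : s ≤ idx := by omega
    simp [hle]
  rw [hright, hleft, List.append_nil]
  unfold find_map_bounds
  have hback := fmbBack_eq_stk cs (idx + 1) 0
  norm_num at hback
  rw [hback, stk_eq_filter cs (idx + 1) (by omega)]
  try rfl

theorem loop_eq (cs ph rev : List Char) (hrev : rev ≠ []) : ∀ (fuel sf : Nat), sf ≤ cs.length →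
    loopB cs ph rev (buildB cs 0 PySem.Dict.empty [] []).1 (buildB cs 0 PySem.Dict.empty [] []).2 sf fuel =
      loopA cs ph rev sf fuel := by
  intro fuel
  induction fuel with
  | zero => intro sf _; rfl
  | succ fuel ihf =>
    intro sf hsf
    unfold loopA loopB
    by_cases hidx : PySem.Chars.findFrom cs rev (sf : Int) none = -1
    · rw [if_pos hidx, if_pos hidx]
    · rw [if_neg hidx, if_neg hidx]
      obtain ⟨hge, hpre, -⟩ := PySem.Chars.findFrom_natCast_spec cs rev sf hsf hidx
      have hidxlen : (PySem.Chars.findFrom cs rev (sf : Int) none).toNat < cs.length := by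
        have hne : cs.drop (PySem.Chars.findFrom cs rev (sf : Int) none).toNat ≠ [] := by
          intro hnil
          rw [hnil] at hpre
          exact hrev (List.prefix_nil.mp hpre)
        rw [ne_eq, List.drop_eq_nil_iff] at hne
        omega
      rw [bounds_eq cs _ hidxlen]
      cases hb : find_map_bounds cs (PySem.Chars.findFrom cs rev (sf : Int) none).toNat with
      | none =>
        simp only [hb]
        apply ihf
        have hlenp := List.IsPrefix.length_le hpre
        rw [List.length_drop] at hlenp
        omega
      | some p =>
        simp only [hb]

theorem outer_eq (cs ph : List Char) : ∀ (revs : List String), (∀ r ∈ revs, r ≠ "") →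
    outerB cs ph (buildB cs 0 PySem.Dict.empty [] []).1 (buildB cs 0 PySem.Dict.empty [] []).2 revs =
      outerA cs ph revs := by
  intro revs
  induction revs with
  | nil => intro _; rfl
  | cons r rest ihr =>
    intro hr
    have hrne : r.toList ≠ [] := by
      intro h
      exact hr r (by simp) (String.toList_eq_nil_iff.mp h)
    unfold outerA outerB
    rw [loop_eq cs ph r.toList hrne (cs.length + 1) 0 (Nat.zero_le _)]
    cases h : loopA cs ph r.toList 0 (cs.length + 1) with
    | none =>
      simp only [h]
      exact ihr (fun a ha => hr a (List.mem_cons_of_mem _ ha))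
    | some p => simp only [h]

-- ===== VERDICT (by name: the statement is the Claim_ definition above) =====
theorem replace_git_map_spec : Claim_equal_replace_git_map := by
  intro content rev_strings placeholder _ hpre
  unfold Spec_replace_git_map replace_git_map replace_git_map_alt
  rw [outer_eq content.toList placeholder.toList rev_strings hpre]
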